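-- pv_equiv track=rewrite | github.com/jemg2030/Retos-Python-CheckIO | ESCHER/CompassMapAndSpyglass.py | navigation
-- ===== SOURCE A (Python) =====
-- def navigation(seaside):
--     #replace this for solution
--     # Find the starting position
--     start_row = None
--     start_col = None
--     for row in range(len(seaside)):
--         for col in range(len(seaside[row])):
--             if seaside[row][col] == 'Y':
--                 start_row = row
--                 start_col = col
--                 break
--         if start_row is not None:
--             break
--
--     # Find the positions of the compass, map, and spyglass
--     compass_row = None
--     compass_col = None
--     map_row = None
--     map_col = None
--     spyglass_row = None
--     spyglass_col = None
--     for row in range(len(seaside)):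
--         for col in range(len(seaside[row])):
--             if seaside[row][col] == 'C':
--                 compass_row = row
--                 compass_col = col
--             elif seaside[row][col] == 'M':
--                 map_row = row
--                 map_col = col
--             elif seaside[row][col] == 'S':
--                 spyglass_row = row
--                 spyglass_col = col
--
--     # Calculate the distances
--     dist_to_compass = max(abs(start_row - compass_row), abs(start_col - compass_col))
--     dist_to_map = max(abs(start_row - map_row), abs(start_col - map_col))
--     dist_to_spyglass = max(abs(start_row - spyglass_row), abs(start_col - spyglass_col))
--
--     # Return the sum of the distances
--     return dist_to_compass + dist_to_map + dist_to_spyglass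
-- ===== SOURCE B (Python) =====
-- def navigation(seaside):
--     # Four independent per-marker searches instead of cell-by-cell grid scans:
--     # 'Y' = first row containing it, leftmost column (str.find);
--     # 'C'/'M'/'S' = rows scanned back-to-front, rightmost column (str.rfind),
--     # so the last occurrence in row-major order wins, as in the original.
--     def first(ch):
--         for r, row in enumerate(seaside):
--             c = row.find(ch)
--             if c >= 0:
--                 return r, c
--
--     def last(ch):
--         for r in range(len(seaside) - 1, -1, -1):
--             c = seaside[r].rfind(ch)
--             if c >= 0:
--                 return r, c
--
--     yr, yc = first('Y')
--     return sum(max(abs(yr - r), abs(yc - c))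
--                for r, c in (last('C'), last('M'), last('S')))
-- ===== Notes on version B (the rewrite author's own statement) =====
-- stated objective: alternative
-- what changed: Replaces A's two nested cell-by-cell grid scans with six mutable position variables by four independent per-marker searches: str.find on rows front-to-back for the first 'Y', and str.rfind on rows back-to-front for 'C'/'M'/'S' so the last row-major occurrence wins, proved equal to A's overwrite semantics.
import Mathlib
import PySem

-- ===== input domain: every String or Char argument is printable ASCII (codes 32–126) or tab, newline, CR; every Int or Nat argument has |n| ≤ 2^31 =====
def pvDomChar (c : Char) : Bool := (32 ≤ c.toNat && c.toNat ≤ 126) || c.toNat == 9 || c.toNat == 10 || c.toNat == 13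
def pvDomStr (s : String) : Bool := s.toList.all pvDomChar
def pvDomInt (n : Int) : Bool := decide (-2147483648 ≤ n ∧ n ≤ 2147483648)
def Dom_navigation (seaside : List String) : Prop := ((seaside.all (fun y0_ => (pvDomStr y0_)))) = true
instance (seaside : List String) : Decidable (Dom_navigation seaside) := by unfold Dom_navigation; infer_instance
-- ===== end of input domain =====

-- B replaces A's two nested cell-by-cell grid scans (six mutable variables) with four
-- independent per-marker searches: find forward for the first 'Y', rfind over rows
-- back-to-front for the last 'C'/'M'/'S' (objective: alternative).

-- ===== PORT A =====
-- first pass, inner loop: first column holding 'Y' in this row (break)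
def navAFindCol (cs : List Char) (c : Int) : Option Int :=
  match cs with
  | [] => none
  | ch :: rest => if ch = 'Y' then some c else navAFindCol rest (c + 1)

-- first pass, outer loop: first (row, col) holding 'Y' (break once found)
def navAFindY (rows : List String) (r : Int) : Option (Int × Int) :=
  match rows with
  | [] => none
  | row :: rest =>
    match navAFindCol row.toList 0 with
    | some c => some (r, c)
    | none => navAFindY rest (r + 1)

-- second pass, the if/elif body updating (compass, map, spyglass)
def navAStep (r c : Int) (ch : Char)
    (st : Option (Int × Int) × Option (Int × Int) × Option (Int × Int)) :
    Option (Int × Int) × Option (Int × Int) × Option (Int × Int) :=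
  if ch = 'C' then (some (r, c), st.2.1, st.2.2)
  else if ch = 'M' then (st.1, some (r, c), st.2.2)
  else if ch = 'S' then (st.1, st.2.1, some (r, c))
  else st

def navAScanRow (cs : List Char) (r c : Int)
    (st : Option (Int × Int) × Option (Int × Int) × Option (Int × Int)) :
    Option (Int × Int) × Option (Int × Int) × Option (Int × Int) :=
  match cs with
  | [] => st
  | ch :: rest => navAScanRow rest r (c + 1) (navAStep r c ch st)

def navAScan (rows : List String) (r : Int)
    (st : Option (Int × Int) × Option (Int × Int) × Option (Int × Int)) :
    Option (Int × Int) × Option (Int × Int) × Option (Int × Int) :=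
  match rows with
  | [] => st
  | row :: rest => navAScan rest (r + 1) (navAScanRow row.toList r 0 st)

def navigation (seaside : List String) : Int :=
  let start := navAFindY seaside 0
  let st := navAScan seaside 0 (none, none, none)
  -- Python raises TypeError when a marker is absent (None arithmetic); those
  -- inputs are excluded by Pre_navigation, the port returns 0 there.
  match start, st.1, st.2.1, st.2.2 with
  | some (sr, sc), some (cr, cc), some (mr, mc), some (pr, pc) =>
      max |sr - cr| |sc - cc| + max |sr - mr| |sc - mc| + max |sr - pr| |sc - pc|
  | _, _, _, _ => 0

-- ===== PORT B =====
-- hand port of str.find for a single character: leftmost index, none = -1 (exact)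
def navBFindChar (ch : Char) (cs : List Char) (c : Int) : Option Int :=
  match cs with
  | [] => none
  | x :: rest => if x = ch then some c else navBFindChar ch rest (c + 1)

-- hand port of str.rfind for a single character: rightmost index, none = -1 (exact)
def navBRFindChar (ch : Char) (cs : List Char) (c : Int) : Option Int :=
  match cs with
  | [] => none
  | x :: rest =>
    match navBRFindChar ch rest (c + 1) with
    | some i => some i
    | none => if x = ch then some c else none

-- Source B's first(ch): rows front-to-back, row.find(ch)
def navBFirst (ch : Char) (rows : List String) (r : Int) : Option (Int × Int) :=
  match rows with
  | [] => none
  | row :: rest =>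
    match navBFindChar ch row.toList 0 with
    | some c => some (r, c)
    | none => navBFirst ch rest (r + 1)

-- Source B's last(ch): rows back-to-front (checked later rows first), row.rfind(ch)
def navBLast (ch : Char) (rows : List String) (r : Int) : Option (Int × Int) :=
  match rows with
  | [] => none
  | row :: rest =>
    match navBLast ch rest (r + 1) with
    | some p => some p
    | none =>
      match navBRFindChar ch row.toList 0 with
      | some c => some (r, c)
      | none => none

def navigation_alt (seaside : List String) : Int :=
  -- Python raises TypeError unpacking None when a marker is absent; excluded by Pre_.
  match navBFirst 'Y' seaside 0 with
  | none => 0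
  | some (yr, yc) =>
    match navBLast 'C' seaside 0 with
    | none => 0
    | some (cr, cc) =>
      match navBLast 'M' seaside 0 with
      | none => 0
      | some (mr, mc) =>
        match navBLast 'S' seaside 0 with
        | none => 0
        | some (pr, pc) =>
          max |yr - cr| |yc - cc| + max |yr - mr| |yc - mc| + max |yr - pr| |yc - pc|

-- ===== PRECONDITION & SPEC =====
-- Pre_ excludes grids missing one of the markers 'Y','C','M','S': there Python A
-- raises TypeError (arithmetic on None) and Python B raises TypeError (unpacking None).
def Pre_navigation (seaside : List String) : Prop :=
  (∃ s ∈ seaside, 'Y' ∈ s.toList) ∧ (∃ s ∈ seaside, 'C' ∈ s.toList) ∧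
  (∃ s ∈ seaside, 'M' ∈ s.toList) ∧ (∃ s ∈ seaside, 'S' ∈ s.toList)
instance (seaside : List String) : Decidable (Pre_navigation seaside) := by
  unfold Pre_navigation; infer_instance
def pvWitness_navigation : List String := ["YC", "MS"]

def Spec_navigation (seaside : List String) (out : Int) : Prop := out = navigation_alt seaside
instance (seaside : List String) (out : Int) : Decidable (Spec_navigation seaside out) := by
  unfold Spec_navigation; infer_instance

-- ===== CLAIM (what is proved, stated in full; the proofs are below) =====
def Claim_equal_navigation : Prop := ∀ (seaside : List String), Dom_navigation seaside → Pre_navigation seaside → Spec_navigation seaside (navigation seaside)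

-- ===== LEMMAS AND PROOFS =====

-- A's break-on-first-'Y' search is B's find-based first('Y')
theorem findCol_eq (cs : List Char) : ∀ c : Int, navBFindChar 'Y' cs c = navAFindCol cs c := by
  induction cs with
  | nil => intro c; rfl
  | cons x rest ih =>
    intro c
    simp only [navBFindChar, navAFindCol, ih]

theorem first_eq (rows : List String) : ∀ r : Int, navBFirst 'Y' rows r = navAFindY rows r := by
  induction rows with
  | nil => intro r; rfl
  | cons row rest ih =>
    intro r
    simp only [navBFirst, navAFindY, findCol_eq, ih]

-- generic: a projection of A's row scan that is overwritten exactly on character ch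
-- equals rfind on the row (last occurrence wins), defaulting to the incoming state
theorem scanRow_proj (π : Option (Int × Int) × Option (Int × Int) × Option (Int × Int) → Option (Int × Int))
    (ch : Char)
    (hπ : ∀ r c x st, π (navAStep r c x st) = if x = ch then some (r, c) else π st)
    (cs : List Char) : ∀ (r c : Int) st,
    π (navAScanRow cs r c st) =
      match navBRFindChar ch cs c with
      | some i => some (r, i)
      | none => π st := by
  induction cs with
  | nil => intro r c st; rfl
  | cons x rest ih =>
    intro r c st
    simp only [navAScanRow, navBRFindChar, ih, hπ]
    cases navBRFindChar ch rest (c + 1) <;> by_cases hx : x = ch <;> simp [hx]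

-- the same for the outer scan: later rows overwrite, so the back-to-front search wins
theorem scan_proj (π : Option (Int × Int) × Option (Int × Int) × Option (Int × Int) → Option (Int × Int))
    (ch : Char)
    (hπ : ∀ r c x st, π (navAStep r c x st) = if x = ch then some (r, c) else π st)
    (rows : List String) : ∀ (r : Int) st,
    π (navAScan rows r st) =
      match navBLast ch rows r with
      | some p => some p
      | none => π st := by
  induction rows with
  | nil => intro r st; rfl
  | cons row rest ih =>
    intro r st
    simp only [navAScan, navBLast, ih, scanRow_proj π ch hπ]
    cases navBLast ch rest (r + 1) <;> cases navBRFindChar ch row.toList 0 <;> simp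

theorem hC : ∀ r c x st, (navAStep r c x st).1 = if x = 'C' then some (r, c) else st.1 := by
  intro r c x st; simp only [navAStep]; split_ifs <;> simp_all
theorem hM : ∀ r c x st, (navAStep r c x st).2.1 = if x = 'M' then some (r, c) else st.2.1 := by
  intro r c x st; simp only [navAStep]; split_ifs <;> simp_all
theorem hS : ∀ r c x st, (navAStep r c x st).2.2 = if x = 'S' then some (r, c) else st.2.2 := by
  intro r c x st; simp only [navAStep]; split_ifs <;> simp_all

-- ===== VERDICT (by name: the statement is the Claim_ definition above) =====
theorem navigation_spec : Claim_equal_navigation := by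
  intro seaside _ _
  show navigation seaside = navigation_alt seaside
  have eC := scan_proj (fun st => st.1) 'C' hC seaside 0 (none, none, none)
  have eM := scan_proj (fun st => st.2.1) 'M' hM seaside 0 (none, none, none)
  have eS := scan_proj (fun st => st.2.2) 'S' hS seaside 0 (none, none, none)
  simp only at eC eM eS
  simp only [navigation, navigation_alt, ← first_eq, eC, eM, eS]
  cases navBFirst 'Y' seaside 0 <;>
    cases navBLast 'C' seaside 0 <;>
    cases navBLast 'M' seaside 0 <;>
    cases navBLast 'S' seaside 0 <;>
    rfl
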